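-- pv_equiv track=rewrite | github.com/kevinrao99/CNOT | cnot_util.py | matrix_to_int
-- ===== SOURCE A (Python) =====
-- def matrix_to_int(matrix):
-- 	exponent = 0
-- 	tot = 0
-- 	for i in range(len(matrix)):
-- 		for j in range(len(matrix[i])):
-- 			tot += (2 ** exponent) * matrix[i][j]
-- 			exponent += 1
--
-- 	return tot
-- ===== SOURCE B (Python) =====
-- def matrix_to_int(matrix):
--     flat = [v for row in matrix for v in row]
--     tot = 0
--     for v in reversed(flat):
--         tot = tot * 2 + v
--     return tot
-- ===== Notes on version B (the rewrite author's own statement) =====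
-- stated objective: faster
-- what changed: Flattens the matrix row-major and accumulates the value by Horner's shift-and-add over the reversed list, eliminating the exponent counter and the per-entry 2**exponent big-integer power.
import Mathlib
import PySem

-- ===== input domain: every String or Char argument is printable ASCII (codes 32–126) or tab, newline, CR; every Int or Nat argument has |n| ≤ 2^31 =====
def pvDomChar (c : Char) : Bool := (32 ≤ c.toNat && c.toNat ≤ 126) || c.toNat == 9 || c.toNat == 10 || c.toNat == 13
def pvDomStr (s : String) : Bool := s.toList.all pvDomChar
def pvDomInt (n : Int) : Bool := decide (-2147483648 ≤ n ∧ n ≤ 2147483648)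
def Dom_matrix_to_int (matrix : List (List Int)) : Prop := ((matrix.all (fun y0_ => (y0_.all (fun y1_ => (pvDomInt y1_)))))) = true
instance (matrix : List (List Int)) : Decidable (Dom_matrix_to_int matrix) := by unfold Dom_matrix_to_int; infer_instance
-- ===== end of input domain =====

-- B flattens the matrix row-major and accumulates by Horner's shift-and-add over the
-- reversed list, eliminating A's exponent counter and per-entry 2**exponent power (objective: simpler).

-- ===== PORT A =====
-- state = (exponent, tot), exactly A's two running variables; exponent is a Nat
-- (in A it only ever counts up from 0)
def matrix_to_int (matrix : List (List Int)) : Int :=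
  (matrix.foldl
    (fun (st : Nat × Int) row =>
      row.foldl (fun (st : Nat × Int) v => (st.1 + 1, st.2 + (2 : Int) ^ st.1 * v)) st)
    (0, 0)).2

-- ===== PORT B =====
def matrix_to_int_alt (matrix : List (List Int)) : Int :=
  (matrix.flatten).reverse.foldl (fun tot v => tot * 2 + v) 0

-- ===== PRECONDITION & SPEC =====
def Spec_matrix_to_int (matrix : List (List Int)) (out : Int) : Prop := out = matrix_to_int_alt matrix
instance (matrix : List (List Int)) (out : Int) : Decidable (Spec_matrix_to_int matrix out) := by unfold Spec_matrix_to_int; infer_instance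

-- ===== CLAIM (what is proved, stated in full; the proofs are below) =====
def Claim_equal_matrix_to_int : Prop := ∀ (matrix : List (List Int)), Dom_matrix_to_int matrix → Spec_matrix_to_int matrix (matrix_to_int matrix)

-- ===== LEMMAS AND PROOFS =====

-- Horner value of a list, low digit first
def pvHor (l : List Int) : Int := l.foldr (fun v t => t * 2 + v) 0

theorem pvHor_append (a b : List Int) :
    pvHor (a ++ b) = pvHor a + (2 : Int) ^ a.length * pvHor b := by
  induction a with
  | nil => simp [pvHor]
  | cons x xs ih =>
    simp only [List.cons_append, pvHor, List.foldr, List.length_cons] at *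
    rw [ih, pow_succ]; ring

theorem pv_inner (row : List Int) (e : Nat) (t : Int) :
    row.foldl (fun (st : Nat × Int) v => (st.1 + 1, st.2 + (2 : Int) ^ st.1 * v)) (e, t)
      = (e + row.length, t + (2 : Int) ^ e * pvHor row) := by
  induction row generalizing e t with
  | nil => simp [pvHor]
  | cons x xs ih =>
    simp only [List.foldl, ih, pvHor, List.foldr, List.length]
    refine Prod.ext ?_ ?_ <;> simp
    · omega
    · rw [pow_succ]; ring

theorem pv_outer (m : List (List Int)) (e : Nat) (t : Int) :
    m.foldl
      (fun (st : Nat × Int) row =>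
        row.foldl (fun (st : Nat × Int) v => (st.1 + 1, st.2 + (2 : Int) ^ st.1 * v)) st)
      (e, t)
      = (e + m.flatten.length, t + (2 : Int) ^ e * pvHor m.flatten) := by
  induction m generalizing e t with
  | nil => simp [pvHor]
  | cons row rows ih =>
    simp only [List.foldl, pv_inner, ih, List.flatten_cons, List.length_append]
    rw [pvHor_append]
    refine Prod.ext ?_ ?_ <;> simp
    · omega
    · rw [pow_add]; ring

theorem pv_alt_eq (m : List (List Int)) : matrix_to_int_alt m = pvHor m.flatten := by
  unfold matrix_to_int_alt pvHor
  rw [List.foldl_reverse]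

-- ===== VERDICT (by name: the statement is the Claim_ definition above) =====
theorem matrix_to_int_spec : Claim_equal_matrix_to_int := by
  intro m _
  unfold Spec_matrix_to_int
  rw [pv_alt_eq]
  unfold matrix_to_int
  rw [pv_outer]
  simp
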